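-- pv_equiv track=rewrite | github.com/billylarsson/TinyTiny | ui/import_and_export.py | remodified_text_with_correct_slashes
-- ===== SOURCE A (Python) =====
-- def remodified_text_with_correct_slashes(text: str) -> str:
--     lft: str = ''
--     rgt: str = ''
--     text = text.strip()
--     while text.startswith('/'):
--         lft += '/'
--         text = text[1:].lstrip()
--     while text.endswith('/'):
--         rgt += '/'
--         text = text[:-1].rstrip()
--
--     blocks: list[str] = text.split('/')
--     mid: str = ' // '.join(x for x in blocks if x.strip())
--     return ' '.join(f'{lft} {mid} {rgt}'.split())
-- ===== SOURCE B (Python) =====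
-- def remodified_text_with_correct_slashes(text: str) -> str:
--     S = text.strip().split('/')
--     ok = [bool(x.strip()) for x in S]
--     if any(ok):
--         L = ok.index(True)
--         R = list(reversed(ok)).index(True)
--         mid = ' // '.join(x.strip() for x, good in zip(S, ok) if good)
--     else:
--         L, R = len(S) - 1, 0
--         mid = ''
--     return ' '.join(('/' * L + ' ' + mid + ' ' + '/' * R).split())
-- ===== Notes on version B (the rewrite author's own statement) =====
-- stated objective: alternative
-- what changed: Replaces A's two slash-peeling while loops (repeated slicing and re-stripping of the string) by a single split('/') followed by end-classification of the segment list: the leading/trailing slash counts are read off as the index of the first/last segment that strips non-empty, and the middle is joined from the stripped non-empty segments.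
import Mathlib
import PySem

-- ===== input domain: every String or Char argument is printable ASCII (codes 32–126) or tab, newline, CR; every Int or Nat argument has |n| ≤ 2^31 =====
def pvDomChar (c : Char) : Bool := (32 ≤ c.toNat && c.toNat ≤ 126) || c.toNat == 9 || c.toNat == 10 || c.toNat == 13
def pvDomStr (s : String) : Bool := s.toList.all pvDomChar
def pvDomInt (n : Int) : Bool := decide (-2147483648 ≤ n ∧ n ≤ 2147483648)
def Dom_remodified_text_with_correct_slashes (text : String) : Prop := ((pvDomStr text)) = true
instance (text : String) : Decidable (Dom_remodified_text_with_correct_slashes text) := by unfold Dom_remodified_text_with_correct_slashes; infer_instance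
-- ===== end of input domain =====

-- B replaces A's two slash-peeling while loops by one split('/') plus end-classification of the
-- segment list (objective: alternative decomposition, same observable return value).

-- ===== PORT A =====
-- while text.startswith('/'): lft += '/'; text = text[1:].lstrip()
def pvLoopL (lft : List Char) (t : List Char) : List Char × List Char :=
  if h : PySem.Chars.startswith t ['/'] = true then
    pvLoopL (lft ++ ['/']) (PySem.Chars.lstrip (t.drop 1))
  else (lft, t)
termination_by t.length
decreasing_by
  have ht : t ≠ [] := by intro he; subst he; simp [PySem.Chars.startswith] at h
  have h1 := List.length_dropWhile_le PySem.Chars.isspace (t.drop 1)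
  have h2 : (t.drop 1).length < t.length := by
    cases t with | nil => exact absurd rfl ht | cons a r => simp
  simp only [PySem.Chars.lstrip]
  omega

-- while text.endswith('/'): rgt += '/'; text = text[:-1].rstrip()
def pvLoopR (rgt : List Char) (t : List Char) : List Char × List Char :=
  if h : PySem.Chars.endswith t ['/'] = true then
    pvLoopR (rgt ++ ['/']) (PySem.Chars.rstrip t.dropLast)
  else (rgt, t)
termination_by t.length
decreasing_by
  have ht : t ≠ [] := by intro he; subst he; simp [PySem.Chars.endswith] at h
  have h1 := List.length_dropWhile_le PySem.Chars.isspace t.dropLast.reverse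
  have h1b : t.dropLast.reverse.length = t.dropLast.length := by simp
  have h2 : t.dropLast.length < t.length := by
    cases t with | nil => exact absurd rfl ht | cons a r => simp
  simp only [PySem.Chars.rstrip, List.length_reverse]
  omega

def remodified_text_with_correct_slashes (text : String) : String :=
  let t0 := PySem.Chars.strip text.toList
  let pL := pvLoopL [] t0
  let pR := pvLoopR [] pL.2
  let blocks := PySem.Chars.splitOn pR.2 ['/']
  let mid := PySem.Chars.join (" // ".toList) (blocks.filter (fun x => !(PySem.Chars.strip x).isEmpty))
  String.ofList (PySem.Chars.join [' '] (PySem.Chars.split₀ (pL.1 ++ ' ' :: (mid ++ ' ' :: pR.1))))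

-- ===== PORT B =====
-- S = text.strip().split('/'); ok = [bool(x.strip()) for x in S]
-- if any(ok): L = ok.index(True); R = list(reversed(ok)).index(True); mid = ' // '.join(x.strip() ...)
-- else: L, R, mid = len(S)-1, 0, ''
-- (ok.index(True) runs only under the any(ok) guard, so Option.getD 0 on index? is exact there)
def remodified_text_with_correct_slashes_alt (text : String) : String :=
  let S := PySem.Chars.splitOn (PySem.Chars.strip text.toList) ['/']
  let ok := S.map (fun x => !(PySem.Chars.strip x).isEmpty)
  let t :=
    if ok.any (· == true) then
      ((PySem.List.index? ok true).getD 0,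
       (PySem.List.index? ok.reverse true).getD 0,
       PySem.Chars.join (" // ".toList) (((S.zip ok).filter (fun p => p.2)).map (fun p => PySem.Chars.strip p.1)))
    else (S.length - 1, 0, ([] : List Char))
  String.ofList (PySem.Chars.join [' ']
    (PySem.Chars.split₀ (List.replicate t.1 '/' ++ ' ' :: (t.2.2 ++ ' ' :: List.replicate t.2.1 '/'))))

-- ===== PRECONDITION & SPEC =====
def Spec_remodified_text_with_correct_slashes (text : String) (out : String) : Prop := out = remodified_text_with_correct_slashes_alt text
instance (text : String) (out : String) : Decidable (Spec_remodified_text_with_correct_slashes text out) := by unfold Spec_remodified_text_with_correct_slashes; infer_instance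

-- ===== CLAIM (what is proved, stated in full; the proofs are below) =====
def Claim_equal_remodified_text_with_correct_slashes : Prop := ∀ (text : String), Dom_remodified_text_with_correct_slashes text → Spec_remodified_text_with_correct_slashes text (remodified_text_with_correct_slashes text)

-- ===== LEMMAS AND PROOFS =====

-- ---- words: a structural characterisation of PySem.Chars.split₀ ----
def pvWordsAux : List Char → List Char → List (List Char)
  | [], cur => if cur.isEmpty then [] else [cur.reverse]
  | c :: rest, cur =>
      if PySem.Chars.isspace c then
        (if cur.isEmpty then pvWordsAux rest [] else cur.reverse :: pvWordsAux rest [])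
      else pvWordsAux rest (c :: cur)

def pvWords (s : List Char) : List (List Char) := pvWordsAux s []

lemma pv_split₀_go_eq (s : List Char) : ∀ cur acc,
    PySem.Chars.split₀.go s cur acc = acc.reverse ++ pvWordsAux s cur := by
  induction s with
  | nil =>
    intro cur acc
    simp only [PySem.Chars.split₀.go, pvWordsAux]
    split <;> simp
  | cons c rest ih =>
    intro cur acc
    simp only [PySem.Chars.split₀.go, pvWordsAux]
    by_cases hc : PySem.Chars.isspace c = true
    · by_cases hcur : cur.isEmpty <;> simp [hc, hcur, ih]
    · simp [hc, ih]

lemma pv_split₀_eq (s : List Char) : PySem.Chars.split₀ s = pvWords s := by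
  simp [PySem.Chars.split₀, pv_split₀_go_eq, pvWords]

lemma pvWordsAux_append_space {c : Char} (hc : PySem.Chars.isspace c = true) (a b : List Char) :
    ∀ cur, pvWordsAux (a ++ c :: b) cur = pvWordsAux a cur ++ pvWords b := by
  induction a with
  | nil =>
    intro cur
    simp only [List.nil_append, pvWordsAux, hc, if_true, pvWords]
    by_cases hcur : cur.isEmpty <;> simp [hcur]
  | cons d a' ih =>
    intro cur
    simp only [List.cons_append, pvWordsAux]
    by_cases hd : PySem.Chars.isspace d = true
    · by_cases hcur : cur.isEmpty <;> simp [hd, hcur, ih]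
    · simp [hd, ih]

lemma pvWords_append_space {c : Char} (hc : PySem.Chars.isspace c = true) (a b : List Char) :
    pvWords (a ++ c :: b) = pvWords a ++ pvWords b := pvWordsAux_append_space hc a b []

lemma pvWordsAux_all_space : ∀ (b : List Char), (∀ x ∈ b, PySem.Chars.isspace x = true) →
    ∀ cur, pvWordsAux b cur = if cur.isEmpty then [] else [cur.reverse] := by
  intro b
  induction b with
  | nil => intro _ cur; simp [pvWordsAux]
  | cons x b' ih =>
    intro h cur
    have hx : PySem.Chars.isspace x = true := h x (by simp)
    have hb' := ih (fun y hy => h y (by simp [hy]))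
    by_cases hcur : cur.isEmpty <;> simp [pvWordsAux, hx, hcur, hb']

lemma pvWordsAux_append_spaces (t : List Char) (h : ∀ x ∈ t, PySem.Chars.isspace x = true) :
    ∀ (a : List Char) (cur : List Char), pvWordsAux (a ++ t) cur = pvWordsAux a cur := by
  intro a
  induction a with
  | nil => intro cur; simp [pvWordsAux, pvWordsAux_all_space t h cur]
  | cons d a' ih =>
    intro cur
    simp only [List.cons_append, pvWordsAux]
    by_cases hd : PySem.Chars.isspace d = true
    · by_cases hcur : cur.isEmpty <;> simp [hd, hcur, ih]
    · simp [hd, ih]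

lemma pvWordsAux_no_space : ∀ (a : List Char), (∀ x ∈ a, PySem.Chars.isspace x = false) →
    ∀ cur, pvWordsAux a cur = if cur.isEmpty && a.isEmpty then [] else [cur.reverse ++ a] := by
  intro a
  induction a with
  | nil => intro _ cur; by_cases hcur : cur.isEmpty <;> simp [pvWordsAux, hcur]
  | cons c a' ih =>
    intro h cur
    have hc : PySem.Chars.isspace c = false := h c (by simp)
    have ha' := ih (fun y hy => h y (by simp [hy]))
    simp [pvWordsAux, hc, ha' (c :: cur)]

lemma pvWords_no_space {a : List Char} (h : ∀ x ∈ a, PySem.Chars.isspace x = false) (hne : a ≠ []) :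
    pvWords a = [a] := by
  simp [pvWords, pvWordsAux_no_space a h, hne]

lemma pv_isspace_slash : PySem.Chars.isspace '/' = false := by decide

lemma pvWords_replicate_slash (n : Nat) :
    pvWords (List.replicate n '/') = if n = 0 then [] else [List.replicate n '/'] := by
  by_cases hn : n = 0
  · simp [hn, pvWords, pvWordsAux]
  · rw [if_neg hn]
    refine pvWords_no_space (fun x hx => ?_) (by simp [hn])
    rw [List.eq_of_mem_replicate hx]; exact pv_isspace_slash

lemma pvWords_lstrip (s : List Char) : pvWords (PySem.Chars.lstrip s) = pvWords s := by
  induction s with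
  | nil => rfl
  | cons c r ih =>
    by_cases hc : PySem.Chars.isspace c = true
    · have h1 : PySem.Chars.lstrip (c :: r) = PySem.Chars.lstrip r := by
        simp [PySem.Chars.lstrip, hc]
      rw [h1, ih]
      simp [pvWords, pvWordsAux, hc]
    · have h1 : PySem.Chars.lstrip (c :: r) = c :: r := by
        simp [PySem.Chars.lstrip, hc]
      rw [h1]

lemma pvWords_rstrip (s : List Char) : pvWords (PySem.Chars.rstrip s) = pvWords s := by
  have hsp : ∀ x ∈ (s.reverse.takeWhile PySem.Chars.isspace).reverse, PySem.Chars.isspace x = true := by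
    intro x hx
    exact List.mem_takeWhile_imp (List.mem_reverse.mp hx)
  have hsplit : PySem.Chars.rstrip s ++ (s.reverse.takeWhile PySem.Chars.isspace).reverse = s := by
    have h := List.takeWhile_append_dropWhile (p := PySem.Chars.isspace) (l := s.reverse)
    rw [PySem.Chars.rstrip, ← List.reverse_append, h, List.reverse_reverse]
  conv_rhs => rw [← hsplit]
  exact (pvWordsAux_append_spaces _ hsp (PySem.Chars.rstrip s) []).symm

lemma pvWords_strip (s : List Char) : pvWords (PySem.Chars.strip s) = pvWords s := by
  simp [PySem.Chars.strip, pvWords_rstrip, pvWords_lstrip]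

-- ---- segs: a structural characterisation of PySem.Chars.splitOn · ['/'] ----
def pvSegsAux : List Char → List Char × List (List Char)
  | [] => ([], [])
  | c :: r =>
      let p := pvSegsAux r
      if c = '/' then ([], p.1 :: p.2) else (c :: p.1, p.2)

def pvSegs (l : List Char) : List (List Char) := (pvSegsAux l).1 :: (pvSegsAux l).2

lemma pv_splitOn_go_eq (l : List Char) : ∀ (fuel : Nat) (cur : List Char) (acc : List (List Char)),
    l.length < fuel →
    PySem.Chars.splitOn.go ['/'] fuel l cur acc
      = acc.reverse ++ (cur.reverse ++ (pvSegsAux l).1) :: (pvSegsAux l).2 := by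
  induction l with
  | nil =>
    intro fuel cur acc hf
    cases fuel with
    | zero => omega
    | succ f => simp [PySem.Chars.splitOn.go, pvSegsAux]
  | cons c rest ih =>
    intro fuel cur acc hf
    cases fuel with
    | zero => omega
    | succ f =>
      simp only [PySem.Chars.splitOn.go]
      by_cases hc : c = '/'
      · subst hc
        have hpre : List.isPrefixOf ['/'] ('/' :: rest) = true := by
          simp [List.isPrefixOf]
        rw [if_pos hpre]
        rw [show List.drop (List.length ['/']) ('/' :: rest) = rest by simp]
        rw [ih f [] (cur.reverse :: acc) (by simp at hf ⊢; omega)]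
        simp [pvSegsAux]
      · have hpre : List.isPrefixOf ['/'] (c :: rest) = false := by
          simp [List.isPrefixOf]
          exact fun h => absurd h.symm hc
        rw [if_neg (by simp [hpre])]
        rw [ih f (c :: cur) acc (by simp at hf ⊢; omega)]
        simp [pvSegsAux, hc]

lemma pv_splitOn_slash (l : List Char) : PySem.Chars.splitOn l ['/'] = pvSegs l := by
  rw [PySem.Chars.splitOn, pv_splitOn_go_eq l (l.length + 1) [] [] (by omega)]
  simp [pvSegs]

lemma pvSegs_cons_slash (r : List Char) : pvSegs ('/' :: r) = [] :: pvSegs r := by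
  simp [pvSegs, pvSegsAux]

lemma pvSegs_cons_nonslash {c : Char} (hc : ¬ c = '/') (r : List Char) :
    pvSegs (c :: r) = (c :: (pvSegsAux r).1) :: (pvSegsAux r).2 := by
  simp [pvSegs, pvSegsAux, hc]

lemma pvSegsAux_single : ∀ (l : List Char), (pvSegsAux l).2 = [] → (pvSegsAux l).1 = l := by
  intro l
  induction l with
  | nil => intro _; rfl
  | cons c r ih =>
    intro h
    by_cases hc : c = '/' <;> simp [pvSegsAux, hc] at h ⊢
    exact ih h

lemma pvSegsAux_no_slash : ∀ (l : List Char), (∀ x ∈ l, ¬ x = '/') → pvSegsAux l = (l, []) := by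
  intro l
  induction l with
  | nil => intro _; rfl
  | cons c r ih =>
    intro h
    have hc : ¬ c = '/' := h c (by simp)
    simp [pvSegsAux, hc, ih (fun y hy => h y (by simp [hy]))]

lemma pvSegsAux_append_slash : ∀ (a : List Char),
    pvSegsAux (a ++ ['/']) = ((pvSegsAux a).1, (pvSegsAux a).2 ++ [[]]) := by
  intro a
  induction a with
  | nil => simp [pvSegsAux]
  | cons c a' ih =>
    by_cases hc : c = '/' <;> simp [pvSegsAux, hc, ih]

lemma pvSegs_append_slash (a : List Char) : pvSegs (a ++ ['/']) = pvSegs a ++ [[]] := by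
  simp [pvSegs, pvSegsAux_append_slash]

def pvModLast (f : List Char → List Char) : List (List Char) → List (List Char)
  | [] => []
  | [x] => [f x]
  | x :: y :: t => x :: pvModLast f (y :: t)

lemma pvModLast_cons_of_ne (f : List Char → List Char) (x : List Char) {ys : List (List Char)}
    (h : ys ≠ []) : pvModLast f (x :: ys) = x :: pvModLast f ys := by
  cases ys with
  | nil => exact absurd rfl h
  | cons y t => rfl

lemma pvSegsAux_lstrip (s : List Char) :
    pvSegsAux (PySem.Chars.lstrip s) = (PySem.Chars.lstrip (pvSegsAux s).1, (pvSegsAux s).2) := by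
  induction s with
  | nil => rfl
  | cons c r ih =>
    by_cases hsp : PySem.Chars.isspace c = true
    · have hc : ¬ c = '/' := by intro h; rw [h] at hsp; exact absurd hsp (by decide)
      have h1 : PySem.Chars.lstrip (c :: r) = PySem.Chars.lstrip r := by
        simp [PySem.Chars.lstrip, hsp]
      rw [h1, ih]
      have h2 : PySem.Chars.lstrip (c :: (pvSegsAux r).1) = PySem.Chars.lstrip (pvSegsAux r).1 := by
        simp [PySem.Chars.lstrip, hsp]
      simp [pvSegsAux, hc, h2]
    · have h1 : PySem.Chars.lstrip (c :: r) = c :: r := by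
        simp [PySem.Chars.lstrip, hsp]
      rw [h1]
      by_cases hc : c = '/'
      · subst hc; simp [pvSegsAux, PySem.Chars.lstrip]
      · have h2 : PySem.Chars.lstrip (c :: (pvSegsAux r).1) = c :: (pvSegsAux r).1 := by
          simp [PySem.Chars.lstrip, hsp]
        simp [pvSegsAux, hc, h2]

lemma pvSegsAux_append_nonslash {c : Char} (hc : ¬ c = '/') : ∀ (a : List Char),
    pvSegsAux (a ++ [c]) =
      if (pvSegsAux a).2 = [] then ((pvSegsAux a).1 ++ [c], [])
      else ((pvSegsAux a).1, pvModLast (· ++ [c]) (pvSegsAux a).2) := by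
  intro a
  induction a with
  | nil => simp [pvSegsAux, hc]
  | cons d a' ih =>
    by_cases hd : d = '/'
    · subst hd
      simp only [List.cons_append, pvSegsAux, if_pos rfl]
      rw [ih]
      by_cases h2 : (pvSegsAux a').2 = []
      · simp [h2, pvModLast]
      · simp only [h2, if_neg, if_false]
        have h3 : (pvSegsAux a').1 :: (pvSegsAux a').2 ≠ [] := by simp
        simp [pvModLast_cons_of_ne _ _ h2, h2]
    · simp only [List.cons_append, pvSegsAux, hd, if_false]
      rw [ih]
      by_cases h2 : (pvSegsAux a').2 = [] <;> simp [h2]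

lemma pvSegs_append_nonslash (a : List Char) {c : Char} (hc : ¬ c = '/') :
    pvSegs (a ++ [c]) = pvModLast (· ++ [c]) (pvSegs a) := by
  rw [pvSegs, pvSegs, pvSegsAux_append_nonslash hc]
  by_cases h2 : (pvSegsAux a).2 = []
  · simp [h2, pvModLast]
  · rw [if_neg h2]
    rw [pvModLast_cons_of_ne _ _ h2]

-- ---- strip facts ----
lemma pv_lstrip_nil_iff (l : List Char) :
    PySem.Chars.lstrip l = [] ↔ ∀ x ∈ l, PySem.Chars.isspace x = true := by
  simp [PySem.Chars.lstrip, List.dropWhile_eq_nil_iff]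

lemma pv_rstrip_nil_iff (l : List Char) :
    PySem.Chars.rstrip l = [] ↔ ∀ x ∈ l, PySem.Chars.isspace x = true := by
  rw [PySem.Chars.rstrip]
  simp [List.dropWhile_eq_nil_iff]

lemma pv_lstrip_idem (l : List Char) :
    PySem.Chars.lstrip (PySem.Chars.lstrip l) = PySem.Chars.lstrip l := by
  induction l with
  | nil => rfl
  | cons c r ih =>
    by_cases hc : PySem.Chars.isspace c = true
    · simpa [PySem.Chars.lstrip, hc] using ih
    · simp [PySem.Chars.lstrip, hc]

lemma pv_rstrip_idem (l : List Char) :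
    PySem.Chars.rstrip (PySem.Chars.rstrip l) = PySem.Chars.rstrip l := by
  have h := pv_lstrip_idem l.reverse
  simp only [PySem.Chars.lstrip] at h
  simp [PySem.Chars.rstrip, h]

lemma pv_rstrip_cons (c : Char) (r : List Char) :
    PySem.Chars.rstrip (c :: r) =
      if (PySem.Chars.rstrip r).isEmpty then
        (if PySem.Chars.isspace c then [] else [c])
      else c :: PySem.Chars.rstrip r := by
  rw [PySem.Chars.rstrip, List.reverse_cons, List.dropWhile_append]
  by_cases h : (List.dropWhile PySem.Chars.isspace r.reverse).isEmpty
  · rw [if_pos h]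
    have h2 : (PySem.Chars.rstrip r).isEmpty = true := by
      simp [PySem.Chars.rstrip]
      simpa [List.isEmpty_iff] using h
    rw [if_pos h2]
    by_cases hc : PySem.Chars.isspace c = true <;> simp [List.dropWhile, hc]
  · rw [if_neg h]
    have h2 : ¬ (PySem.Chars.rstrip r).isEmpty = true := by
      simp [PySem.Chars.rstrip]
      simpa [List.isEmpty_iff] using h
    rw [if_neg h2]
    simp [PySem.Chars.rstrip]

lemma pv_rstrip_cons_nonspace {c : Char} (hc : PySem.Chars.isspace c = false) (r : List Char) :
    PySem.Chars.rstrip (c :: r) = c :: PySem.Chars.rstrip r := by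
  rw [pv_rstrip_cons]
  by_cases h : (PySem.Chars.rstrip r).isEmpty = true
  · rw [if_pos h, if_neg (by simp [hc])]
    simp [List.isEmpty_iff] at h
    simp [h]
  · rw [if_neg h]

lemma pv_rstrip_cons_of_ne {r : List Char} (hr : PySem.Chars.rstrip r ≠ []) (c : Char) :
    PySem.Chars.rstrip (c :: r) = c :: PySem.Chars.rstrip r := by
  rw [pv_rstrip_cons, if_neg (by simp [List.isEmpty_iff, hr])]

lemma pv_rstrip_prefix (l : List Char) : PySem.Chars.rstrip l <+: l := by
  conv_rhs => rw [← List.reverse_reverse l]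
  rw [PySem.Chars.rstrip]
  exact List.reverse_prefix.mpr (List.dropWhile_suffix _)

lemma pv_strip_lstrip (l : List Char) :
    PySem.Chars.strip (PySem.Chars.lstrip l) = PySem.Chars.strip l := by
  simp [PySem.Chars.strip, pv_lstrip_idem]

lemma pv_lstrip_rstrip_comm (l : List Char) :
    PySem.Chars.lstrip (PySem.Chars.rstrip l) = PySem.Chars.rstrip (PySem.Chars.lstrip l) := by
  induction l with
  | nil => rfl
  | cons c r ih =>
    by_cases hsp : PySem.Chars.isspace c = true
    · have h1 : PySem.Chars.lstrip (c :: r) = PySem.Chars.lstrip r := by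
        simp [PySem.Chars.lstrip, hsp]
      rw [pv_rstrip_cons, h1]
      by_cases hre : (PySem.Chars.rstrip r).isEmpty = true
      · rw [if_pos hre, if_pos hsp]
        have hrnil : PySem.Chars.rstrip r = [] := by simpa [List.isEmpty_iff] using hre
        have hall := (pv_rstrip_nil_iff r).1 hrnil
        have hln : PySem.Chars.lstrip r = [] := (pv_lstrip_nil_iff r).2 hall
        rw [hln]
        rfl
      · rw [if_neg hre]
        have h2 : PySem.Chars.lstrip (c :: PySem.Chars.rstrip r) = PySem.Chars.lstrip (PySem.Chars.rstrip r) := by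
          simp [PySem.Chars.lstrip, hsp]
        rw [h2, ih]
    · have hc' : PySem.Chars.isspace c = false := by simpa using hsp
      have h1 : PySem.Chars.lstrip (c :: r) = c :: r := by
        simp [PySem.Chars.lstrip, hsp]
      rw [h1, pv_rstrip_cons_nonspace hc']
      simp [PySem.Chars.lstrip, hsp]

lemma pv_strip_rstrip (l : List Char) :
    PySem.Chars.strip (PySem.Chars.rstrip l) = PySem.Chars.strip l := by
  rw [PySem.Chars.strip, PySem.Chars.strip, pv_lstrip_rstrip_comm, pv_rstrip_idem]

lemma pv_strip_nil_iff (l : List Char) :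
    PySem.Chars.strip l = [] ↔ ∀ x ∈ l, PySem.Chars.isspace x = true := by
  rw [PySem.Chars.strip]
  constructor
  · intro h x hx
    have h1 := (pv_rstrip_nil_iff _).1 h
    have hsplit : List.takeWhile PySem.Chars.isspace l ++ PySem.Chars.lstrip l = l :=
      List.takeWhile_append_dropWhile
    rw [← hsplit] at hx
    rcases List.mem_append.mp hx with h3 | h3
    · exact List.mem_takeWhile_imp h3
    · exact h1 x h3
  · intro h
    rw [(pv_lstrip_nil_iff l).2 h]
    rfl

lemma pvSegs_rstrip (s : List Char) :
    pvSegs (PySem.Chars.rstrip s) = pvModLast PySem.Chars.rstrip (pvSegs s) := by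
  induction s with
  | nil => simp [PySem.Chars.rstrip, pvSegs, pvSegsAux, pvModLast]
  | cons c r ih =>
    by_cases hre : (PySem.Chars.rstrip r).isEmpty = true
    · have hrnil : PySem.Chars.rstrip r = [] := by simpa [List.isEmpty_iff] using hre
      have hall := (pv_rstrip_nil_iff r).1 hrnil
      have hnos : pvSegsAux r = (r, []) := pvSegsAux_no_slash r (fun x hx hxs => by
        rw [hxs] at hx
        exact absurd (hall '/' hx) (by decide))
      by_cases hsp : PySem.Chars.isspace c = true
      · have hc : ¬ c = '/' := by intro h; rw [h] at hsp; exact absurd hsp (by decide)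
        have hcr : PySem.Chars.rstrip (c :: r) = [] := by
          rw [pv_rstrip_cons, if_pos hre, if_pos hsp]
        rw [hcr]
        rw [pvSegs_cons_nonslash hc, hnos]
        simp [pvSegs, pvSegsAux, pvModLast, pv_rstrip_cons, hre, hsp]
      · have hcr : PySem.Chars.rstrip (c :: r) = [c] := by
          rw [pv_rstrip_cons, if_pos hre, if_neg hsp]
        rw [hcr]
        by_cases hc : c = '/'
        · subst hc
          rw [pvSegs_cons_slash, pvSegs_cons_slash]
          have hsr : pvSegs r = [r] := by rw [pvSegs, hnos]
          rw [hsr]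
          simp [pvSegs, pvSegsAux, pvModLast, hrnil]
        · rw [pvSegs_cons_nonslash hc, pvSegs_cons_nonslash hc, hnos]
          simp [pvSegs, pvSegsAux, pvModLast, hc, hcr]
    · have hrne : PySem.Chars.rstrip r ≠ [] := by simpa [List.isEmpty_iff] using hre
      have hcr : PySem.Chars.rstrip (c :: r) = c :: PySem.Chars.rstrip r :=
        pv_rstrip_cons_of_ne hrne c
      rw [hcr]
      by_cases hc : c = '/'
      · subst hc
        rw [pvSegs_cons_slash, pvSegs_cons_slash, ih]
        rw [pvModLast_cons_of_ne _ _ (by simp [pvSegs])]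
      · rw [pvSegs_cons_nonslash hc, pvSegs_cons_nonslash hc]
        cases h2 : (pvSegsAux r).2 with
        | nil =>
          have h1 : (pvSegsAux r).1 = r := pvSegsAux_single r h2
          have ihx : pvSegs (PySem.Chars.rstrip r) = [PySem.Chars.rstrip r] := by
            rw [ih, pvSegs, h1, h2, pvModLast]
          have e1 : (pvSegsAux (PySem.Chars.rstrip r)).1 = PySem.Chars.rstrip r ∧
              (pvSegsAux (PySem.Chars.rstrip r)).2 = [] := by
            rw [pvSegs] at ihx
            exact ⟨(List.cons.injEq _ _ _ _ ▸ ihx).1, (List.cons.injEq _ _ _ _ ▸ ihx).2⟩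
          rw [e1.1, e1.2, h1]
          simp [pvModLast, hcr]
        | cons y t =>
          have ihx := ih
          rw [pvSegs, pvSegs, h2, pvModLast_cons_of_ne _ _ (by simp)] at ihx
          have e1 : (pvSegsAux (PySem.Chars.rstrip r)).1 = (pvSegsAux r).1 :=
            (List.cons.injEq _ _ _ _ ▸ ihx).1
          have e2 : (pvSegsAux (PySem.Chars.rstrip r)).2 = pvModLast PySem.Chars.rstrip (y :: t) :=
            (List.cons.injEq _ _ _ _ ▸ ihx).2
          rw [e1, e2]
          conv_rhs => rw [pvModLast_cons_of_ne _ _ (by simp)]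

-- ---- derived values: left count, right count, middle words ----
def pvOK (s : List Char) : List Bool := (pvSegs s).map (fun x => !(PySem.Chars.strip x).isEmpty)

def pvKept (s : List Char) : List (List Char) :=
  (pvSegs s).filter (fun x => !(PySem.Chars.strip x).isEmpty)

def pvJ : List (List Char) → List (List Char)
  | [] => []
  | [x] => pvWords x
  | x :: y :: t => pvWords x ++ ['/', '/'] :: pvJ (y :: t)

def pvMid (s : List Char) : List (List Char) := pvJ (pvKept s)

def pvLval (s : List Char) : Nat :=
  if (pvOK s).any (· == true) then (PySem.List.index? (pvOK s) true).getD 0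
  else (pvSegs s).length - 1

def pvRval (s : List Char) : Nat :=
  if (pvOK s).any (· == true) then (PySem.List.index? (pvOK s).reverse true).getD 0
  else 0

def pvOUT (n : Nat) (ws : List (List Char)) (m : Nat) : List Char :=
  PySem.Chars.join [' ']
    ((if n = 0 then [] else [List.replicate n '/']) ++ ws ++ (if m = 0 then [] else [List.replicate m '/']))

lemma pv_space_isspace : PySem.Chars.isspace ' ' = true := by decide

lemma pv_assemble (n m : Nat) (mid : List Char) :
    PySem.Chars.join [' ']
        (pvWords (List.replicate n '/' ++ ' ' :: (mid ++ ' ' :: List.replicate m '/')))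
      = pvOUT n (pvWords mid) m := by
  rw [pvWords_append_space pv_space_isspace, pvWords_append_space pv_space_isspace,
    pvWords_replicate_slash, pvWords_replicate_slash, pvOUT]
  simp [List.append_assoc]

lemma pv_sep_toList : (" // ".toList) = [' ', '/', '/', ' '] := rfl

lemma pv_words_slashslash : pvWords ['/', '/'] = [['/', '/']] := by decide

lemma pv_words_join (xs : List (List Char)) :
    pvWords (PySem.Chars.join (" // ".toList) xs) = pvJ xs := by
  rw [pv_sep_toList]
  induction xs with
  | nil => rw [PySem.Chars.join_nil]; rfl
  | cons x ys ih =>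
    cases ys with
    | nil => rw [PySem.Chars.join_singleton]; rfl
    | cons y t =>
      rw [PySem.Chars.join_cons_cons]
      have hshape : x ++ [' ', '/', '/', ' '] ++ PySem.Chars.join [' ', '/', '/', ' '] (y :: t)
          = x ++ ' ' :: (['/', '/'] ++ ' ' :: PySem.Chars.join [' ', '/', '/', ' '] (y :: t)) := by
        simp
      rw [hshape, pvWords_append_space pv_space_isspace, pvWords_append_space pv_space_isspace,
        pv_words_slashslash, ih]
      rfl

lemma pvJ_eq_of_map_words : ∀ (xs ys : List (List Char)),
    xs.map pvWords = ys.map pvWords → pvJ xs = pvJ ys := by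
  intro xs
  induction xs with
  | nil =>
    intro ys h
    cases ys with
    | nil => rfl
    | cons b bs => simp at h
  | cons x xs' ih =>
    intro ys h
    cases ys with
    | nil => simp at h
    | cons b bs =>
      simp only [List.map_cons, List.cons.injEq] at h
      obtain ⟨h1, h2⟩ := h
      cases xs' with
      | nil =>
        cases bs with
        | nil => simp [pvJ, h1]
        | cons b2 bs2 => simp at h2
      | cons x2 xs2 =>
        cases bs with
        | nil => simp at h2
        | cons b2 bs2 =>
          have := ih (b2 :: bs2) h2
          simp [pvJ, h1, this]

lemma pvJ_map_strip (xs : List (List Char)) : pvJ (xs.map PySem.Chars.strip) = pvJ xs := by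
  apply pvJ_eq_of_map_words
  rw [List.map_map]
  exact List.map_congr_left (fun a _ => pvWords_strip a)

lemma pv_zip_filter (S : List (List Char)) (f : List Char → Bool) (g : List Char → List Char) :
    ((S.zip (S.map f)).filter (fun p => p.2)).map (fun p => g p.1) = (S.filter f).map g := by
  induction S with
  | nil => rfl
  | cons x S' ih =>
    by_cases hx : f x = true <;> simp [hx, ih, List.filter_cons]

-- ---- index? facts ----
lemma pv_idx_head_true (rest : List Bool) : (PySem.List.index? (true :: rest) true).getD 0 = 0 := by
  simp [PySem.List.index?, List.idxOf?_cons]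

lemma pv_idx_cons_false (rest : List Bool) (h : true ∈ rest) :
    (PySem.List.index? (false :: rest) true).getD 0 = (PySem.List.index? rest true).getD 0 + 1 := by
  have hs : List.idxOf? true rest ≠ none := by
    intro hnone
    rw [List.idxOf?_eq_none_iff] at hnone
    exact hnone h
  obtain ⟨k, hk⟩ := Option.ne_none_iff_exists'.mp hs
  simp [PySem.List.index?, List.idxOf?_cons, hk]

lemma pv_idx_append_left (l₁ l₂ : List Bool) (h : true ∈ l₁) :
    (PySem.List.index? (l₁ ++ l₂) true).getD 0 = (PySem.List.index? l₁ true).getD 0 := by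
  induction l₁ with
  | nil => simp at h
  | cons a l ih =>
    cases a with
    | true => rw [List.cons_append, pv_idx_head_true, pv_idx_head_true]
    | false =>
      have hmem : true ∈ l := by simpa using h
      rw [List.cons_append, pv_idx_cons_false _ (List.mem_append_left _ hmem),
        pv_idx_cons_false _ hmem, ih hmem]

lemma pv_any_of_mem {l : List Bool} (h : true ∈ l) : l.any (· == true) = true :=
  List.any_eq_true.mpr ⟨true, h, rfl⟩

-- ---- invariance of the derived values under the peeling steps ----
lemma pv_f_nil : (!(PySem.Chars.strip ([] : List Char)).isEmpty) = false := rfl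

lemma pvOK_cons_slash (r : List Char) : pvOK ('/' :: r) = false :: pvOK r := by
  rw [pvOK, pvOK, pvSegs_cons_slash, List.map_cons, pv_f_nil]

lemma pvOK_lstrip (s : List Char) : pvOK (PySem.Chars.lstrip s) = pvOK s := by
  rw [pvOK, pvOK, pvSegs, pvSegs, pvSegsAux_lstrip]
  simp [pv_strip_lstrip]

lemma pvOK_append_slash (a : List Char) : pvOK (a ++ ['/']) = pvOK a ++ [false] := by
  rw [pvOK, pvOK, pvSegs_append_slash, List.map_append, List.map_singleton, pv_f_nil]

lemma pvModLast_map (f : List Char → Bool) (g : List Char → List Char)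
    (hfg : ∀ x, f (g x) = f x) : ∀ xs, (pvModLast g xs).map f = xs.map f := by
  intro xs
  induction xs with
  | nil => rfl
  | cons x ys ih =>
    cases ys with
    | nil => simp [pvModLast, hfg]
    | cons y t =>
      rw [pvModLast_cons_of_ne _ _ (by simp), List.map_cons, List.map_cons, ih]

lemma pvOK_rstrip (s : List Char) : pvOK (PySem.Chars.rstrip s) = pvOK s := by
  rw [pvOK, pvOK, pvSegs_rstrip]
  exact pvModLast_map _ _ (fun x => by simp [pv_strip_rstrip]) _

lemma pvOK_length (s : List Char) : (pvOK s).length = (pvSegs s).length := by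
  simp [pvOK]

lemma pvMid_cons_slash (r : List Char) : pvMid ('/' :: r) = pvMid r := by
  rw [pvMid, pvMid, pvKept, pvKept, pvSegs_cons_slash, List.filter_cons]
  simp [pv_f_nil]

lemma pvMid_lstrip (s : List Char) : pvMid (PySem.Chars.lstrip s) = pvMid s := by
  rw [pvMid, pvMid, pvKept, pvKept, pvSegs, pvSegs, pvSegsAux_lstrip]
  apply pvJ_eq_of_map_words
  simp only [List.filter_cons, pv_strip_lstrip]
  by_cases hb : (!(PySem.Chars.strip (pvSegsAux s).1).isEmpty) = true
  · simp [hb, pvWords_lstrip]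
  · simp [hb]

lemma pvMid_append_slash (a : List Char) : pvMid (a ++ ['/']) = pvMid a := by
  rw [pvMid, pvMid, pvKept, pvKept, pvSegs_append_slash, List.filter_append]
  simp [pv_f_nil]

lemma pv_filter_modLast : ∀ (xs : List (List Char)),
    ((pvModLast PySem.Chars.rstrip xs).filter (fun x => !(PySem.Chars.strip x).isEmpty)).map pvWords
      = (xs.filter (fun x => !(PySem.Chars.strip x).isEmpty)).map pvWords := by
  intro xs
  induction xs with
  | nil => rfl
  | cons x ys ih =>
    cases ys with
    | nil =>
      simp only [pvModLast, List.filter_cons, pv_strip_rstrip]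
      by_cases hb : (!(PySem.Chars.strip x).isEmpty) = true
      · simp [hb, pvWords_rstrip]
      · simp [hb]
    | cons y t =>
      rw [pvModLast_cons_of_ne _ _ (by simp), List.filter_cons, List.filter_cons]
      by_cases hb : (!(PySem.Chars.strip x).isEmpty) = true
      · simp [hb, ih]
      · simp [hb, ih]

lemma pvMid_rstrip (s : List Char) : pvMid (PySem.Chars.rstrip s) = pvMid s := by
  rw [pvMid, pvMid, pvKept, pvKept, pvSegs_rstrip]
  exact pvJ_eq_of_map_words _ _ (pv_filter_modLast (pvSegs s))

lemma pv_filter_nil_of_any_false {f : List Char → Bool} : ∀ (l : List (List Char)),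
    (l.map f).any (· == true) = false → l.filter f = [] := by
  intro l
  induction l with
  | nil => intro _; rfl
  | cons x l' ih =>
    intro h
    simp only [List.map_cons, List.any_cons, Bool.or_eq_false_iff] at h
    have hx : f x = false := by simpa using h.1
    rw [List.filter_cons, hx]
    exact ih (by simpa using h.2)

-- ---- trimmedness transfer ----
lemma pv_lstrip_cons_eq_self {c : Char} {r : List Char}
    (h : PySem.Chars.lstrip (c :: r) = c :: r) : PySem.Chars.isspace c = false := by
  by_contra hc
  have hc' : PySem.Chars.isspace c = true := by simpa using hc
  rw [show PySem.Chars.lstrip (c :: r) = PySem.Chars.lstrip r from by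
    simp [PySem.Chars.lstrip, hc']] at h
  have hlen := congrArg List.length h
  have h2 := List.length_dropWhile_le PySem.Chars.isspace r
  simp [PySem.Chars.lstrip] at hlen
  omega

lemma pv_trimL_prefix {p s : List Char} (hs : PySem.Chars.lstrip s = s) (hp : p <+: s) :
    PySem.Chars.lstrip p = p := by
  cases p with
  | nil => rfl
  | cons d p' =>
    obtain ⟨t, ht⟩ := hp
    rw [← ht] at hs
    simp only [List.cons_append] at hs
    have hd : PySem.Chars.isspace d = false := pv_lstrip_cons_eq_self hs
    simp [PySem.Chars.lstrip, hd]

lemma pv_trimR_suffix {l s : List Char} (hs : PySem.Chars.rstrip s = s) (hl : l <:+ s) :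
    PySem.Chars.rstrip l = l := by
  have hs' : PySem.Chars.lstrip s.reverse = s.reverse := by
    have h0 := congrArg List.reverse hs
    rw [PySem.Chars.rstrip] at h0
    simpa [PySem.Chars.lstrip] using h0
  have hl' : PySem.Chars.lstrip l.reverse = l.reverse :=
    pv_trimL_prefix hs' (List.reverse_prefix.mpr hl)
  have h1 := congrArg List.reverse hl'
  rw [PySem.Chars.lstrip] at h1
  rw [PySem.Chars.rstrip]
  simpa using h1

-- ---- head/last classification ----
lemma pv_startswith_slash {t : List Char} :
    PySem.Chars.startswith t ['/'] = true ↔ ∃ r, t = '/' :: r := by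
  rw [PySem.Chars.startswith_iff]
  constructor
  · rintro ⟨t', ht⟩
    exact ⟨t', by rw [← ht]; rfl⟩
  · rintro ⟨r, rfl⟩
    exact ⟨r, rfl⟩

lemma pv_endswith_slash {t : List Char} :
    PySem.Chars.endswith t ['/'] = true ↔ ∃ a, t = a ++ ['/'] := by
  rw [PySem.Chars.endswith_iff]
  constructor
  · rintro ⟨t', ht⟩
    exact ⟨t', ht.symm⟩
  · rintro ⟨a, rfl⟩
    exact ⟨a, rfl⟩

lemma pv_head_ok (s : List Char) (hL : PySem.Chars.lstrip s = s) (hne : s ≠ [])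
    (hsw : PySem.Chars.startswith s ['/'] = false) :
    ∃ rest, pvOK s = true :: rest := by
  cases s with
  | nil => exact absurd rfl hne
  | cons c r =>
    have hcns : PySem.Chars.isspace c = false := pv_lstrip_cons_eq_self hL
    have hc : ¬ c = '/' := by
      intro h
      subst h
      rw [pv_startswith_slash.mpr ⟨r, rfl⟩] at hsw
      cases hsw
    have hstrip : PySem.Chars.strip (c :: (pvSegsAux r).1) ≠ [] := by
      intro hx
      have := (pv_strip_nil_iff _).1 hx c (by simp)
      rw [hcns] at this
      cases this
    refine ⟨((pvSegsAux r).2).map (fun x => !(PySem.Chars.strip x).isEmpty), ?_⟩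
    rw [pvOK, pvSegs_cons_nonslash hc, List.map_cons]
    simp [List.isEmpty_iff, hstrip]

lemma pv_map_modLast_concat (f : List Char → Bool) (g : List Char → List Char)
    (h : ∀ x, f (g x) = true) : ∀ (xs : List (List Char)) (x : List Char),
    ∃ init, (pvModLast g (x :: xs)).map f = init ++ [true] := by
  intro xs
  induction xs with
  | nil => exact fun x => ⟨[], by simp [pvModLast, h]⟩
  | cons y t ih =>
    intro x
    obtain ⟨i, hi⟩ := ih y
    exact ⟨f x :: i, by rw [pvModLast_cons_of_ne _ _ (by simp), List.map_cons, hi]; rfl⟩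

lemma pv_last_ok (s : List Char) (hR : PySem.Chars.rstrip s = s) (hne : s ≠ [])
    (hew : PySem.Chars.endswith s ['/'] = false) :
    ∃ init, pvOK s = init ++ [true] := by
  obtain ⟨a, c, rfl⟩ : ∃ a c, s = a ++ [c] := by
    cases hrev : s.reverse with
    | nil => exact absurd (by simpa using congrArg List.reverse hrev) hne
    | cons c a' => exact ⟨a'.reverse, c, by rw [← List.reverse_reverse s, hrev]; simp⟩
  have hcns : PySem.Chars.isspace c = false := by
    by_contra hcc
    have hc' : PySem.Chars.isspace c = true := by simpa using hcc
    have hstep : PySem.Chars.rstrip (a ++ [c]) = PySem.Chars.rstrip a := by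
      rw [PySem.Chars.rstrip, PySem.Chars.rstrip]
      simp [List.dropWhile_cons, hc']
    rw [hstep] at hR
    have hlen := congrArg List.length hR
    have h2 := List.length_dropWhile_le PySem.Chars.isspace a.reverse
    have h3 : a.reverse.length = a.length := by simp
    simp [PySem.Chars.rstrip] at hlen
    omega
  have hc : ¬ c = '/' := by
    intro h
    subst h
    rw [pv_endswith_slash.mpr ⟨a, rfl⟩] at hew
    cases hew
  have hf : ∀ x : List Char, (!(PySem.Chars.strip (x ++ [c])).isEmpty) = true := by
    intro x
    have hne' : PySem.Chars.strip (x ++ [c]) ≠ [] := by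
      intro h0
      have := (pv_strip_nil_iff _).1 h0 c (by simp)
      rw [hcns] at this
      cases this
    simp [List.isEmpty_iff, hne']
  obtain ⟨init, hinit⟩ := pv_map_modLast_concat (fun x => !(PySem.Chars.strip x).isEmpty)
    (· ++ [c]) hf (pvSegsAux a).2 (pvSegsAux a).1
  exact ⟨init, by rw [pvOK, pvSegs_append_nonslash a hc, pvSegs]; exact hinit⟩

-- ---- the A-side pipeline, reorganised around the two loops ----
def pvAssembleA (lft t rgt : List Char) : List Char :=
  PySem.Chars.join [' ']
    (PySem.Chars.split₀
      (lft ++ ' ' ::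
        (PySem.Chars.join (" // ".toList)
            ((PySem.Chars.splitOn t ['/']).filter (fun x => !(PySem.Chars.strip x).isEmpty))
          ++ ' ' :: rgt)))

def pvARight (n m : Nat) (t : List Char) : List Char :=
  pvAssembleA (List.replicate n '/') (pvLoopR (List.replicate m '/') t).2
    (pvLoopR (List.replicate m '/') t).1

def pvALeft (n : Nat) (t : List Char) : List Char :=
  pvAssembleA (pvLoopL (List.replicate n '/') t).1
    (pvLoopR [] (pvLoopL (List.replicate n '/') t).2).2
    (pvLoopR [] (pvLoopL (List.replicate n '/') t).2).1

lemma pvLoopL_eq_true {t : List Char} (h : PySem.Chars.startswith t ['/'] = true)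
    (lft : List Char) :
    pvLoopL lft t = pvLoopL (lft ++ ['/']) (PySem.Chars.lstrip (t.drop 1)) := by
  rw [pvLoopL]
  simp [h]

lemma pvLoopL_eq_false {t : List Char} (h : PySem.Chars.startswith t ['/'] = false)
    (lft : List Char) : pvLoopL lft t = (lft, t) := by
  rw [pvLoopL]
  simp [h]

lemma pvLoopR_eq_true {t : List Char} (h : PySem.Chars.endswith t ['/'] = true)
    (rgt : List Char) :
    pvLoopR rgt t = pvLoopR (rgt ++ ['/']) (PySem.Chars.rstrip t.dropLast) := by
  rw [pvLoopR]
  simp [h]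

lemma pvLoopR_eq_false {t : List Char} (h : PySem.Chars.endswith t ['/'] = false)
    (rgt : List Char) : pvLoopR rgt t = (rgt, t) := by
  rw [pvLoopR]
  simp [h]

lemma pv_rep_succ (m : Nat) : List.replicate m '/' ++ ['/'] = List.replicate (m + 1) '/' := by
  rw [List.replicate_succ']

lemma pvARight_step {t : List Char} (hend : PySem.Chars.endswith t ['/'] = true) (n m : Nat) :
    pvARight n m t = pvARight n (m + 1) (PySem.Chars.rstrip t.dropLast) := by
  rw [pvARight, pvARight, pvLoopR_eq_true hend, pv_rep_succ]

lemma pvALeft_step {t : List Char} (hsw : PySem.Chars.startswith t ['/'] = true) (n : Nat) :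
    pvALeft n t = pvALeft (n + 1) (PySem.Chars.lstrip (t.drop 1)) := by
  rw [pvALeft, pvALeft, pvLoopL_eq_true hsw, pv_rep_succ]

lemma pv_main_left_nil (n : Nat) :
    pvALeft n [] = pvOUT (n + pvLval []) (pvMid []) (pvRval []) := by
  have e1 : pvLoopL (List.replicate n '/') [] = (List.replicate n '/', []) :=
    pvLoopL_eq_false (by decide) _
  rw [pvALeft, e1]
  show pvAssembleA (List.replicate n '/') (pvLoopR [] []).2 (pvLoopR [] []).1
      = pvOUT (n + pvLval []) (pvMid []) (pvRval [])
  rw [pvLoopR_eq_false (by decide)]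
  show PySem.Chars.join [' ']
      (PySem.Chars.split₀
        (List.replicate n '/' ++ ' ' ::
          (PySem.Chars.join (" // ".toList)
              ((PySem.Chars.splitOn [] ['/']).filter (fun x => !(PySem.Chars.strip x).isEmpty))
            ++ ' ' :: []))) = pvOUT (n + pvLval []) (pvMid []) (pvRval [])
  rw [pv_splitOn_slash]
  rw [show PySem.Chars.join (" // ".toList)
      ((pvSegs []).filter (fun x => !(PySem.Chars.strip x).isEmpty)) = ([] : List Char) from rfl]
  rw [pv_split₀_eq]
  have hasm := pv_assemble n 0 ([] : List Char)
  simp only [List.replicate_zero] at hasm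
  rw [hasm]
  rw [show pvLval [] = 0 from by decide, show pvRval [] = 0 from by decide,
    show pvMid [] = ([] : List (List Char)) from rfl,
    show pvWords [] = ([] : List (List Char)) from rfl, Nat.add_zero]

-- ---- the main inductions ----
lemma pv_main_right : ∀ (N : Nat) (s : List Char), s.length ≤ N →
    PySem.Chars.lstrip s = s → PySem.Chars.rstrip s = s → s ≠ [] →
    PySem.Chars.startswith s ['/'] = false →
    ∀ n m, pvARight n m s = pvOUT n (pvMid s) (m + pvRval s) := by
  intro N
  induction N with
  | zero =>
    intro s hlen hL hR hne hsw
    cases s with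
    | nil => exact absurd rfl hne
    | cons c r => simp at hlen
  | succ N ih =>
    intro s hlen hL hR hne hsw n m
    by_cases hend : PySem.Chars.endswith s ['/'] = true
    · obtain ⟨a, rfl⟩ := pv_endswith_slash.mp hend
      have hane : a ≠ [] := by
        rintro rfl
        exact absurd (by simpa using hsw) (by decide)
      obtain ⟨d, a', rfl⟩ : ∃ d a', a = d :: a' := by
        cases a with
        | nil => exact absurd rfl hane
        | cons d a' => exact ⟨d, a', rfl⟩
      have hTLa : PySem.Chars.lstrip (d :: a') = d :: a' :=
        pv_trimL_prefix hL ⟨['/'], rfl⟩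
      have hd_ns : PySem.Chars.isspace d = false := pv_lstrip_cons_eq_self hTLa
      have hsw₀ : PySem.Chars.startswith (d :: a') ['/'] = false := by
        by_contra hx
        obtain ⟨r0, hr0⟩ := pv_startswith_slash.mp (by simpa using hx)
        have hd : d = '/' := (List.cons.injEq _ _ _ _ ▸ hr0).1
        subst hd
        exact absurd (by simpa using hsw) (by simpa using pv_startswith_slash.mpr ⟨a' ++ ['/'], by simp⟩)
      have hra_pre : PySem.Chars.rstrip (d :: a') <+: d :: a' := pv_rstrip_prefix _
      have hTLra : PySem.Chars.lstrip (PySem.Chars.rstrip (d :: a')) = PySem.Chars.rstrip (d :: a') :=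
        pv_trimL_prefix hTLa hra_pre
      have hTRra := pv_rstrip_idem (d :: a')
      have hrane : PySem.Chars.rstrip (d :: a') ≠ [] := by
        intro h0
        have := (pv_rstrip_nil_iff _).1 h0 d (by simp)
        rw [hd_ns] at this
        cases this
      have hsw' : PySem.Chars.startswith (PySem.Chars.rstrip (d :: a')) ['/'] = false := by
        by_contra hx
        obtain ⟨r0, hr0⟩ := pv_startswith_slash.mp (by simpa using hx)
        obtain ⟨t', ht'⟩ := hra_pre
        rw [hr0] at ht'
        simp only [List.cons_append] at ht'
        have : '/' = d := (List.cons.injEq _ _ _ _ ▸ ht').1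
        rw [← this] at hsw₀
        exact absurd hsw₀ (by simp [pv_startswith_slash.mpr ⟨a', rfl⟩])
      have hlen' : (PySem.Chars.rstrip (d :: a')).length ≤ N := by
        have h1 := hra_pre.length_le
        have h2 : ((d :: a') ++ ['/']).length ≤ N + 1 := hlen
        simp at h1 h2 ⊢
        omega
      have hdl : ((d :: a') ++ ['/']).dropLast = d :: a' := by
        rw [List.dropLast_concat]
      rw [pvARight_step hend, hdl, ih _ hlen' hTLra hTRra hrane hsw' n (m + 1)]
      -- B-side equalities
      obtain ⟨rest, hok⟩ := pv_head_ok (d :: a') hTLa (by simp) hsw₀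
      have htr : true ∈ pvOK (d :: a') := by rw [hok]; simp
      have hokA : pvOK ((d :: a') ++ ['/']) = pvOK (d :: a') ++ [false] := pvOK_append_slash _
      have hokr : pvOK (PySem.Chars.rstrip (d :: a')) = pvOK (d :: a') := pvOK_rstrip _
      have hmidr : pvMid (PySem.Chars.rstrip (d :: a')) = pvMid ((d :: a') ++ ['/']) := by
        rw [pvMid_rstrip, pvMid_append_slash]
      have hanyA : (pvOK ((d :: a') ++ ['/'])).any (· == true) = true := by
        rw [hokA]
        exact pv_any_of_mem (List.mem_append_left _ htr)
      have hanyr : (pvOK (PySem.Chars.rstrip (d :: a'))).any (· == true) = true := by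
        rw [hokr]
        exact pv_any_of_mem htr
      have hRv : pvRval ((d :: a') ++ ['/']) = pvRval (PySem.Chars.rstrip (d :: a')) + 1 := by
        rw [pvRval, pvRval, if_pos hanyA, if_pos hanyr, hokA, hokr, List.reverse_append]
        have : ([false] : List Bool).reverse ++ (pvOK (d :: a')).reverse
            = false :: (pvOK (d :: a')).reverse := by simp
        rw [this, pv_idx_cons_false _ (by simpa using htr)]
      rw [hmidr, hRv]
      have harith : m + 1 + pvRval (PySem.Chars.rstrip (d :: a'))
          = m + (pvRval (PySem.Chars.rstrip (d :: a')) + 1) := by omega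
      rw [harith]
    · have hend' : PySem.Chars.endswith s ['/'] = false := by simpa using hend
      rw [pvARight, pvLoopR_eq_false hend']
      rw [pvAssembleA, pv_splitOn_slash, pv_split₀_eq, pv_assemble, pv_words_join]
      obtain ⟨init, hinit⟩ := pv_last_ok s hR hne hend'
      have hany : (pvOK s).any (· == true) = true := by
        rw [hinit]
        exact pv_any_of_mem (List.mem_append_right _ (by simp))
      have hRv : pvRval s = 0 := by
        rw [pvRval, if_pos hany, hinit, List.reverse_append]
        have : ([true] : List Bool).reverse ++ init.reverse = true :: init.reverse := by simp
        rw [this, pv_idx_head_true]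
      rw [hRv, Nat.add_zero]
      rfl

lemma pv_main_left : ∀ (N : Nat) (s : List Char), s.length ≤ N →
    PySem.Chars.lstrip s = s → PySem.Chars.rstrip s = s →
    ∀ n, pvALeft n s = pvOUT (n + pvLval s) (pvMid s) (pvRval s) := by
  intro N
  induction N with
  | zero =>
    intro s hlen hL hR n
    have hs : s = [] := by
      cases s with
      | nil => rfl
      | cons c r => simp at hlen
    subst hs
    exact pv_main_left_nil n
  | succ N ih =>
    intro s hlen hL hR n
    by_cases hsw : PySem.Chars.startswith s ['/'] = true
    · obtain ⟨r, rfl⟩ := pv_startswith_slash.mp hsw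
      have hdrop : (('/' : Char) :: r).drop 1 = r := rfl
      have hTL' := pv_lstrip_idem r
      have hTR' : PySem.Chars.rstrip (PySem.Chars.lstrip r) = PySem.Chars.lstrip r := by
        have hsuf : PySem.Chars.lstrip r <:+ '/' :: r := by
          have h1 : PySem.Chars.lstrip r <:+ r := by
            rw [PySem.Chars.lstrip]
            exact List.dropWhile_suffix _
          exact h1.trans (List.suffix_cons _ _)
        exact pv_trimR_suffix hR hsuf
      have hlen' : (PySem.Chars.lstrip r).length ≤ N := by
        have h1 := List.length_dropWhile_le PySem.Chars.isspace r
        simp only [PySem.Chars.lstrip]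
        simp at hlen
        omega
      rw [pvALeft_step hsw, hdrop, ih _ hlen' hTL' hTR' (n + 1)]
      -- B-side equalities
      have hokc : pvOK ('/' :: r) = false :: pvOK r := pvOK_cons_slash r
      have hokl : pvOK (PySem.Chars.lstrip r) = pvOK r := pvOK_lstrip r
      have hmid : pvMid (PySem.Chars.lstrip r) = pvMid ('/' :: r) := by
        rw [pvMid_lstrip, pvMid_cons_slash]
      by_cases hany : (pvOK r).any (· == true) = true
      · have htr : true ∈ pvOK r := by
          obtain ⟨x, hx, he⟩ := List.any_eq_true.mp hany
          have hxe : x = true := by simpa using he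
          rwa [hxe] at hx
        have hanyC : (pvOK ('/' :: r)).any (· == true) = true := by
          rw [hokc]
          exact pv_any_of_mem (List.mem_cons_of_mem _ htr)
        have hanyl : (pvOK (PySem.Chars.lstrip r)).any (· == true) = true := by
          rw [hokl]
          exact hany
        have hL1 : pvLval ('/' :: r) = pvLval (PySem.Chars.lstrip r) + 1 := by
          rw [pvLval, pvLval, if_pos hanyC, if_pos hanyl, hokc, hokl]
          exact pv_idx_cons_false _ htr
        have hR1 : pvRval ('/' :: r) = pvRval (PySem.Chars.lstrip r) := by
          rw [pvRval, pvRval, if_pos hanyC, if_pos hanyl, hokc, hokl, List.reverse_cons]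
          exact pv_idx_append_left _ _ (by simpa using htr)
        rw [hmid, hL1, hR1]
        have harith : n + 1 + pvLval (PySem.Chars.lstrip r)
            = n + (pvLval (PySem.Chars.lstrip r) + 1) := by omega
        rw [harith]
      · have hany' : (pvOK r).any (· == true) = false := by simpa using hany
        have hanyC : (pvOK ('/' :: r)).any (· == true) = false := by
          rw [hokc]
          simpa using hany'
        have hanyl : (pvOK (PySem.Chars.lstrip r)).any (· == true) = false := by
          rw [hokl]
          exact hany'
        have hL1 : pvLval ('/' :: r) = pvLval (PySem.Chars.lstrip r) + 1 := by
          rw [pvLval, pvLval, if_neg (by rw [hanyC]; simp), if_neg (by rw [hanyl]; simp)]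
          have e1 : (pvSegs ('/' :: r)).length = (pvSegs r).length + 1 := by
            rw [pvSegs_cons_slash]
            rfl
          have e2 : (pvSegs (PySem.Chars.lstrip r)).length = (pvSegs r).length := by
            rw [← pvOK_length, ← pvOK_length, hokl]
          have e3 : 1 ≤ (pvSegs r).length := by
            rw [pvSegs]
            simp
          omega
        have hR1 : pvRval ('/' :: r) = pvRval (PySem.Chars.lstrip r) := by
          rw [pvRval, pvRval, if_neg (by rw [hanyC]; simp), if_neg (by rw [hanyl]; simp)]
        rw [hmid, hL1, hR1]
        have harith : n + 1 + pvLval (PySem.Chars.lstrip r)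
            = n + (pvLval (PySem.Chars.lstrip r) + 1) := by omega
        rw [harith]
    · have hsw' : PySem.Chars.startswith s ['/'] = false := by simpa using hsw
      cases s with
      | nil =>
        exact pv_main_left_nil n
      | cons c r =>
        have hswitch : pvALeft n (c :: r) = pvARight n 0 (c :: r) := by
          rw [pvALeft, pvARight, pvLoopL_eq_false hsw']
          rfl
        rw [hswitch,
          pv_main_right (c :: r).length (c :: r) le_rfl hL hR (by simp) hsw' n 0]
        obtain ⟨rest, hok⟩ := pv_head_ok (c :: r) hL (by simp) hsw'
        have hany : (pvOK (c :: r)).any (· == true) = true := by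
          rw [hok]
          exact pv_any_of_mem (by simp)
        have hLv : pvLval (c :: r) = 0 := by
          rw [pvLval, if_pos hany, hok, pv_idx_head_true]
        rw [hLv, Nat.add_zero, Nat.zero_add]

lemma pv_A_eq (text : String) :
    remodified_text_with_correct_slashes text
      = String.ofList (pvALeft 0 (PySem.Chars.strip text.toList)) := rfl

lemma pv_alt_eq (text : String) :
    remodified_text_with_correct_slashes_alt text
      = String.ofList (pvOUT (pvLval (PySem.Chars.strip text.toList))
          (pvMid (PySem.Chars.strip text.toList)) (pvRval (PySem.Chars.strip text.toList))) := by
  simp only [remodified_text_with_correct_slashes_alt, pv_splitOn_slash]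
  refine congrArg String.ofList ?_
  by_cases hany : (pvOK (PySem.Chars.strip text.toList)).any (· == true) = true
  · rw [if_pos (by simpa [pvOK] using hany)]
    rw [pv_split₀_eq, pv_assemble, pv_zip_filter, pv_words_join, pvJ_map_strip]
    rw [pvLval, if_pos hany, pvRval, if_pos hany]
    rfl
  · have hany' : ((pvSegs (PySem.Chars.strip text.toList)).map
        (fun x => !(PySem.Chars.strip x).isEmpty)).any (· == true) = false := by
      simpa [pvOK] using hany
    rw [if_neg (by rw [hany']; simp)]
    rw [pv_split₀_eq, pv_assemble]
    have hanyF : (pvOK (PySem.Chars.strip text.toList)).any (· == true) = false := by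
      simpa using hany
    rw [pvLval, if_neg (by rw [hanyF]; simp), pvRval, if_neg (by rw [hanyF]; simp)]
    rw [pvMid, pvKept, pv_filter_nil_of_any_false _ hany']
    rfl

-- ===== VERDICT (by name: the statement is the Claim_ definition above) =====
theorem remodified_text_with_correct_slashes_spec : Claim_equal_remodified_text_with_correct_slashes := by
  intro text _
  unfold Spec_remodified_text_with_correct_slashes
  rw [pv_A_eq, pv_alt_eq]
  have hL : PySem.Chars.lstrip (PySem.Chars.strip text.toList) = PySem.Chars.strip text.toList := by
    rw [PySem.Chars.strip, pv_lstrip_rstrip_comm, pv_lstrip_idem]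
  have hR : PySem.Chars.rstrip (PySem.Chars.strip text.toList) = PySem.Chars.strip text.toList := by
    rw [PySem.Chars.strip, pv_rstrip_idem]
  rw [pv_main_left (PySem.Chars.strip text.toList).length _ le_rfl hL hR 0]
  rw [Nat.zero_add]
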